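-- pv_equiv track=rewrite | github.com/Abdulhamid97Mousa/mosaic | gym_gui/ui/handlers/features/human_vs_agent.py | _find_king_square
-- ===== SOURCE A (Python) =====
-- from typing import TYPE_CHECKING, Callable, Optional
--
-- def _find_king_square(fen: str, player: str) -> Optional[str]:
--     """Find the king's square for a given player from FEN.
--
--     Args:
--         fen: FEN position string
--         player: "white" or "black"
--
--     Returns:
--         King's square in algebraic notation, or None if not found
--     """
--     king_char = "K" if player == "white" else "k"
--     position = fen.split()[0]
--
--     row = 7
--     col = 0
--
--     for char in position:
--         if char == "/":
--             row -= 1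
--             col = 0
--         elif char.isdigit():
--             col += int(char)
--         else:
--             if char == king_char:
--                 file_char = chr(ord("a") + col)
--                 rank_char = str(row + 1)
--                 return f"{file_char}{rank_char}"
--             col += 1
--
--     return None
-- ===== SOURCE B (Python) =====
-- from typing import Optional
--
--
-- def _find_king_square(fen: str, player: str) -> Optional[str]:
--     """Two-phase: index every piece's first square in a dict, then one lookup."""
--     king_char = "K" if player == "white" else "k"
--     first = {}
--     for r, rank in enumerate(fen.split()[0].split("/")):
--         row = 7 - r
--         col = 0
--         for ch in rank:
--             if ch.isdigit():
--                 col += int(ch)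
--             else:
--                 first.setdefault(ch, (col, row))
--                 col += 1
--     sq = first.get(king_char)
--     if sq is None:
--         return None
--     col, row = sq
--     return chr(ord("a") + col) + str(row + 1)
-- ===== Notes on version B (the rewrite author's own statement) =====
-- stated objective: alternative
-- what changed: A fuses scanning and searching into one early-returning loop over the raw FEN chars; B is two-phase: it splits the board field on '/', builds a dict indexing each piece character's first square via setdefault, and answers with a single dict lookup.
import Mathlib
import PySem

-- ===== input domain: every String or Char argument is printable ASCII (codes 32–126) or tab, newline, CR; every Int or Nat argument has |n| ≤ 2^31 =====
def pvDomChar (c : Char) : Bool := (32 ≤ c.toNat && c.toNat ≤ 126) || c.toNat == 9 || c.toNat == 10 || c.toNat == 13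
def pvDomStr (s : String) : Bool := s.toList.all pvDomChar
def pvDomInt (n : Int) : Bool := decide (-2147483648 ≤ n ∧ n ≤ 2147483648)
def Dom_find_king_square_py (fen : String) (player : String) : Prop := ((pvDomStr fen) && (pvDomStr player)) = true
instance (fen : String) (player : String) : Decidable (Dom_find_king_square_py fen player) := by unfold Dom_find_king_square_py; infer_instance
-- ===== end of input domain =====

-- B replaces A's fused early-returning scan by a two-phase pass: split the board on '/', index the first
-- square of every piece character in a dict, then answer with one dict lookup (alternative, not faster).

-- shared output formatting: f"{chr(ord('a')+col)}{row+1}" (both Pythons build this same string)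
def renderSq (col row : Int) : String := String.ofList (Char.ofNat (97 + col).toNat :: (PySem.Int.toStr (row + 1)).toList)

-- ===== PORT A =====
-- A's for-loop over the position chars with mutable row/col and an early return.
-- int(char) on a char passing str.isdigit (ASCII domain, so '0'..'9') is its digit value: (ch.toNat : Int) - 48 is exact there.
def goA (king : Char) : List Char → Int → Int → Option String
  | [], _, _ => none
  | ch :: rest, row, col =>
    if ch = '/' then goA king rest (row - 1) 0
    else if PySem.Chars.isdigit ch then goA king rest row (col + ((ch.toNat : Int) - 48))
    else if ch = king then some (renderSq col row)
    else goA king rest row (col + 1)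

def find_king_square_py (fen : String) (player : String) : Option String :=
  let king : Char := if player = "white" then 'K' else 'k'
  match PySem.Str.split₀ fen with
  | [] => none   -- fen.split()[0] raises IndexError here; excluded by Pre_
  | w :: _ => goA king w.toList 7 0

-- ===== PORT B =====
-- inner loop of Source B: first.setdefault(ch, (col, row)) over the chars of one rank
def bRank (row : Int) : List Char → Int → PySem.Dict Char (Int × Int) → PySem.Dict Char (Int × Int)
  | [], _, d => d
  | ch :: rest, col, d =>
    if PySem.Chars.isdigit ch then bRank row rest (col + ((ch.toNat : Int) - 48)) d
    else bRank row rest (col + 1) (d.setdefault ch (col, row))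

-- outer loop of Source B: for r, rank in enumerate(...): row = 7 - r
def bRanks : List (List Char) → Int → PySem.Dict Char (Int × Int) → PySem.Dict Char (Int × Int)
  | [], _, d => d
  | rank :: rest, r, d => bRanks rest (r + 1) (bRank (7 - r) rank 0 d)

def find_king_square_py_alt (fen : String) (player : String) : Option String :=
  let king : Char := if player = "white" then 'K' else 'k'
  match PySem.Str.split₀ fen with
  | [] => none   -- fen.split()[0] raises IndexError here; excluded by Pre_
  | w :: _ =>
    let d := bRanks (PySem.Chars.splitOn w.toList ['/']) 0 PySem.Dict.empty
    match d.get? king with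
    | none => none
    | some (col, row) => some (renderSq col row)

-- ===== PRECONDITION & SPEC =====
-- Pre_ excludes exactly the fens with no non-whitespace character, where both Pythons raise IndexError on fen.split()[0].
def Pre_find_king_square_py (fen : String) (player : String) : Prop := PySem.Str.split₀ fen ≠ []
instance (fen : String) (player : String) : Decidable (Pre_find_king_square_py fen player) := by unfold Pre_find_king_square_py; infer_instance

def pvWitness_find_king_square_py : String × String := ("4k3/8/8/8/8/8/8/4K3 w - - 0 1", "white")

def Spec_find_king_square_py (fen : String) (player : String) (out : Option String) : Prop := out = find_king_square_py_alt fen player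
instance (fen : String) (player : String) (out : Option String) : Decidable (Spec_find_king_square_py fen player out) := by unfold Spec_find_king_square_py; infer_instance

-- ===== CLAIM (what is proved, stated in full; the proofs are below) =====
def Claim_equal_find_king_square_py : Prop := ∀ (fen : String) (player : String), Dom_find_king_square_py fen player → Pre_find_king_square_py fen player → Spec_find_king_square_py fen player (find_king_square_py fen player)

-- ===== LEMMAS AND PROOFS =====

-- the list of occupied squares (piece, col, row) of the position, in A's scan order
def occs : List Char → Int → Int → List (Char × Int × Int)
  | [], _, _ => []
  | ch :: rest, row, col =>
    if ch = '/' then occs rest (row - 1) 0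
    else if PySem.Chars.isdigit ch then occs rest row (col + ((ch.toNat : Int) - 48))
    else (ch, col, row) :: occs rest row (col + 1)

-- the occupied squares of one '/'-free rank
def occsR (row : Int) : List Char → Int → List (Char × Int × Int)
  | [], _ => []
  | ch :: rest, col =>
    if PySem.Chars.isdigit ch then occsR row rest (col + ((ch.toNat : Int) - 48))
    else (ch, col, row) :: occsR row rest (col + 1)

def occsRanks : List (List Char) → Int → List (Char × Int × Int)
  | [], _ => []
  | p :: ps, row => occsR row p 0 ++ occsRanks ps (row - 1)

-- structural reference version of s.split('/'), with the piece being built as the accumulator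
def mySplit : List Char → List Char → List (List Char)
  | pre, [] => [pre]
  | pre, c :: rest => if c = '/' then pre :: mySplit [] rest else mySplit (pre ++ [c]) rest

-- A's scan returns the rendered square of the first occupied square holding the king
theorem goA_eq (king : Char) : ∀ (cs : List Char) (row col : Int),
    goA king cs row col =
      ((occs cs row col).find? (fun p => p.1 == king)).map (fun p => renderSq p.2.1 p.2.2) := by
  intro cs
  induction cs with
  | nil => intro row col; simp [goA, occs]
  | cons ch rest ih =>
    intro row col
    by_cases h1 : ch = '/'
    · simp [goA, occs, h1, ih]
    · by_cases h2 : PySem.Chars.isdigit ch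
      · simp [goA, occs, h1, h2, ih]
      · by_cases h3 : ch = king
        · subst h3; simp [goA, occs, h1, h2, List.find?]
        · simp [goA, occs, h1, h2, h3, List.find?, ih]

theorem mySplit_pre : ∀ (cs : List Char) (pre : List Char),
    mySplit pre cs = (pre ++ (mySplit [] cs).headI) :: (mySplit [] cs).tail := by
  intro cs
  induction cs with
  | nil => intro pre; simp [mySplit]
  | cons c rest ih =>
    intro pre
    by_cases h : c = '/'
    · simp [mySplit, h]
    · simp only [mySplit, if_neg h]
      rw [ih (pre ++ [c]), ih ([] ++ [c])]
      simp

theorem splitOn_go_eq : ∀ (l : List Char) (fuel : Nat) (cur : List Char) (acc : List (List Char)),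
    l.length < fuel →
    PySem.Chars.splitOn.go ['/'] fuel l cur acc = acc.reverse ++ mySplit cur.reverse l := by
  intro l
  induction l with
  | nil =>
    intro fuel cur acc h
    match fuel, h with
    | fuel + 1, _ => simp [PySem.Chars.splitOn.go, mySplit]
  | cons c rest ih =>
    intro fuel cur acc h
    match fuel, h with
    | fuel + 1, h =>
      by_cases hc : c = '/'
      · subst hc
        rw [show PySem.Chars.splitOn.go ['/'] (fuel+1) ('/' :: rest) cur acc
              = PySem.Chars.splitOn.go ['/'] fuel rest [] (cur.reverse :: acc) by
            simp [PySem.Chars.splitOn.go, List.isPrefixOf]]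
        rw [ih fuel [] (cur.reverse :: acc) (by simpa using h)]
        simp [mySplit]
      · rw [show PySem.Chars.splitOn.go ['/'] (fuel+1) (c :: rest) cur acc
              = PySem.Chars.splitOn.go ['/'] fuel rest (c :: cur) acc by
            simp [PySem.Chars.splitOn.go, List.isPrefixOf, (by simpa using Ne.symm hc : ('/' == c) = false)]]
        rw [ih fuel (c :: cur) acc (by simpa using h)]
        simp [mySplit, hc]

theorem splitOn_eq (cs : List Char) : PySem.Chars.splitOn cs ['/'] = mySplit [] cs := by
  rw [PySem.Chars.splitOn, splitOn_go_eq cs (cs.length + 1) [] [] (by omega)]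
  simp

-- the fused scan visits exactly the squares that the per-rank pass over the split pieces visits
theorem occs_split : ∀ (cs : List Char) (row col : Int),
    occsR row ((mySplit [] cs).headI) col ++ occsRanks ((mySplit [] cs).tail) (row - 1)
      = occs cs row col := by
  intro cs
  induction cs with
  | nil => intro row col; simp [mySplit, occsR, occsRanks, occs]
  | cons c rest ih =>
    intro row col
    by_cases h1 : c = '/'
    · subst h1
      have hs : mySplit [] ('/' :: rest) = [] :: (mySplit [] rest).headI :: (mySplit [] rest).tail := by
        simp only [mySplit, if_pos rfl]
        rw [mySplit_pre rest []]
        simp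
      rw [hs]
      simp only [List.headI_cons, List.tail_cons, occsRanks, occsR, List.nil_append]
      rw [ih (row - 1) 0]
      simp [occs]
    · have hs : mySplit [] (c :: rest) = (c :: (mySplit [] rest).headI) :: (mySplit [] rest).tail := by
        simp only [mySplit, if_neg h1]
        rw [mySplit_pre rest ([] ++ [c])]
        simp
      rw [hs]
      simp only [List.headI_cons, List.tail_cons]
      by_cases h2 : PySem.Chars.isdigit c
      · simp only [occsR, if_pos h2, occs, if_neg h1]
        exact ih row (col + ((c.toNat : Int) - 48))
      · simp only [occsR, if_neg h2, occs, if_neg h1, List.cons_append]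
        rw [ih row (col + 1)]

-- the dict after one rank answers: what it already knew, else the rank's first occurrence
theorem bRank_get? (k : Char) (row : Int) : ∀ (cs : List Char) (col : Int) (d : PySem.Dict Char (Int × Int)),
    (bRank row cs col d).get? k =
      ((d.get? k).orElse (fun _ => ((occsR row cs col).find? (fun p => p.1 == k)).map (·.2))) := by
  intro cs
  induction cs with
  | nil => intro col d; cases h : d.get? k <;> simp [bRank, occsR, Option.orElse, h]
  | cons ch rest ih =>
    intro col d
    by_cases h2 : PySem.Chars.isdigit ch
    · simp only [bRank, if_pos h2, occsR]
      exact ih (col + ((ch.toNat : Int) - 48)) d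
    · simp only [bRank, if_neg h2, occsR]
      rw [ih (col + 1) (d.setdefault ch (col, row))]
      by_cases hk : ch = k
      · subst hk
        rw [PySem.Dict.get?_setdefault_self]
        simp only [List.find?, BEq.rfl]
        cases h : d.get? ch <;> simp [Option.orElse, h]
      · rw [PySem.Dict.get?_setdefault_of_ne d _ (Ne.symm hk)]
        simp only [List.find?]
        rw [show (ch == k) = false from by simp [hk]]

theorem bRanks_get? (k : Char) : ∀ (ps : List (List Char)) (r : Int) (d : PySem.Dict Char (Int × Int)),
    (bRanks ps r d).get? k =
      ((d.get? k).orElse (fun _ => ((occsRanks ps (7 - r)).find? (fun p => p.1 == k)).map (·.2))) := by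
  intro ps
  induction ps with
  | nil => intro r d; cases h : d.get? k <;> simp [bRanks, occsRanks, Option.orElse, h]
  | cons p rest ih =>
    intro r d
    simp only [bRanks, occsRanks]
    rw [ih (r + 1) (bRank (7 - r) p 0 d), bRank_get? k (7 - r) p 0 d]
    have h7 : (7 : Int) - (r + 1) = 7 - r - 1 := by ring
    rw [h7, List.find?_append]
    cases hd : d.get? k <;> cases hf : (occsR (7 - r) p 0).find? (fun p => p.1 == k) <;>
      simp [Option.orElse, hd, hf]

-- B's whole dict lookup = first king occurrence of A's scan order
theorem alt_get? (k : Char) (cs : List Char) :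
    (bRanks (PySem.Chars.splitOn cs ['/']) 0 PySem.Dict.empty).get? k =
      ((occs cs 7 0).find? (fun p => p.1 == k)).map (·.2) := by
  rw [bRanks_get? k _ 0 PySem.Dict.empty, splitOn_eq]
  rw [show mySplit [] cs = (mySplit [] cs).headI :: (mySplit [] cs).tail from by
    conv_lhs => rw [mySplit_pre cs []]
    simp]
  simp only [occsRanks]
  rw [show (7 : Int) - 0 = 7 from by ring, occs_split cs 7 0]
  simp [Option.orElse]

-- ===== VERDICT (by name: the statement is the Claim_ definition above) =====
theorem find_king_square_py_spec : Claim_equal_find_king_square_py := by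
  intro fen player _ hpre
  unfold Spec_find_king_square_py find_king_square_py find_king_square_py_alt
  cases hsp : PySem.Str.split₀ fen with
  | nil => exact absurd hsp hpre
  | cons w ws =>
    simp only
    rw [goA_eq, alt_get?]
    cases hf : (occs w.toList 7 0).find? (fun p => p.1 == if player = "white" then 'K' else 'k') with
    | none => simp [hf]
    | some p => simp [hf]
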